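-- pv_equiv track=rewrite | github.com/pattaj764/sp-analysis | sp-analysis.py | streak_RisingDays
-- ===== SOURCE A (Python) =====
-- def streak_RisingDays( price ):
--     streak = 0
--     topStreak = 0
--     i = 1
--     while i < len( price ):
--         if price[i] > price[i - 1]:
--         # loops to compare previous price to determine rising day
--             streak += 1
--             # adds to streak if true
--             topStreak = max( topStreak, streak )
--             # updates top streak
--         else:
--              streak = 0
--         i += 1
--     return topStreak
-- ===== SOURCE B (Python) =====
-- def streak_RisingDays(price):
--     # Positions where the price does NOT rise split the day axis into segments;
--     # the answer is the longest segment between consecutive "fall" positions.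
--     if not price:
--         return 0
--     n = len(price)
--     falls = [-1] + [i for i in range(n - 1) if price[i + 1] <= price[i]] + [n - 1]
--     return max(b - a - 1 for a, b in zip(falls, falls[1:]))
-- ===== Notes on version B (the rewrite author's own statement) =====
-- stated objective: alternative
-- what changed: A keeps an inline running streak counter with a running max while scanning indices; B instead materializes the positions of non-rising days (with sentinels) and returns the maximum gap between consecutive fall positions minus one.
import Mathlib
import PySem

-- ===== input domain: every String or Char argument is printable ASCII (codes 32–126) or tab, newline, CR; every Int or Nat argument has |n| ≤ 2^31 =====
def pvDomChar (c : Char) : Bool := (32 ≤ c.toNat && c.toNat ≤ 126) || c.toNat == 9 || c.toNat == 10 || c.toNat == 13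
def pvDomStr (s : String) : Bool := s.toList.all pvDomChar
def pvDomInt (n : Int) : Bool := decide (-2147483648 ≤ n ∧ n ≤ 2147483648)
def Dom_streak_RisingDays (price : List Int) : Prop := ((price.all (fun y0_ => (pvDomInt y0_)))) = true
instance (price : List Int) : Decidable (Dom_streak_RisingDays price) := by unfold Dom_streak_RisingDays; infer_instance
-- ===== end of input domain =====

-- B replaces A's inline running-streak counter by the fall-position/max-gap decomposition (objective: alternative, same cost).

-- ===== PORT A =====
-- while i < len(price): compare price[i] with price[i-1], keep (streak, topStreak)
def streak_RisingDays (price : List Int) : Int :=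
  ((PySem.List.pyRange 1 (price.length : Int) 1).foldl
    (fun (st : Int × Int) i =>
      if PySem.List.pyGetD price (i - 1) 0 < PySem.List.pyGetD price i 0 then
        (st.1 + 1, max st.2 (st.1 + 1))
      else (0, st.2)) (0, 0)).2

-- ===== PORT B =====
-- falls = [-1] + [i for i in range(n-1) if price[i+1] <= price[i]] + [n-1];
-- answer = max(b - a - 1 for a, b in zip(falls, falls[1:]))  (falls has ≥ 2 elements, so max is on a nonempty sequence)
def streak_RisingDays_alt (price : List Int) : Int :=
  if price = [] then 0
  else
    let n : Int := (price.length : Int)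
    let falls : List Int :=
      [-1] ++ ((PySem.List.pyRange 0 (n - 1) 1).filter
        (fun i => PySem.List.pyGetD price (i + 1) 0 ≤ PySem.List.pyGetD price i 0)) ++ [n - 1]
    (PySem.List.max? ((falls.zip falls.tail).map (fun p => p.2 - p.1 - 1)) (fun y => y)).getD 0

-- ===== PRECONDITION & SPEC =====
def Spec_streak_RisingDays (price : List Int) (out : Int) : Prop := out = streak_RisingDays_alt price
instance (price : List Int) (out : Int) : Decidable (Spec_streak_RisingDays price out) := by unfold Spec_streak_RisingDays; infer_instance

-- ===== CLAIM (what is proved, stated in full; the proofs are below) =====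
def Claim_equal_streak_RisingDays : Prop := ∀ (price : List Int), Dom_streak_RisingDays price → Spec_streak_RisingDays price (streak_RisingDays price)

-- ===== LEMMAS AND PROOFS =====

-- the boolean "rises" sequence: rises[k] = (price[k] < price[k+1])
def pvRises (price : List Int) : List Bool :=
  (price.zip price.tail).map (fun p => decide (p.1 < p.2))

-- length of the maximal true prefix, and the longest true run (Int-valued)
def pvLead : List Bool → Int
  | [] => 0
  | b :: r => if b then pvLead r + 1 else 0

def pvBest : List Bool → Int
  | [] => 0
  | b :: r => if b then max (pvLead r + 1) (pvBest r) else pvBest r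

-- positions of the false entries
def pvFP : List Bool → List Int
  | [] => []
  | b :: r => if b then (pvFP r).map (· + 1) else 0 :: (pvFP r).map (· + 1)

-- right-nested max of the gaps of (a :: ps ++ [e]) minus 1
def pvGmax (a : Int) : List Int → Int → Int
  | [], e => e - a - 1
  | p :: ps, e => max (p - a - 1) (pvGmax p ps e)

def pvGapsList (a : Int) : List Int → Int → List Int
  | [], e => [e - a - 1]
  | p :: ps, e => (p - a - 1) :: pvGapsList p ps e

theorem pvLead_nonneg (r : List Bool) : 0 ≤ pvLead r := by
  induction r with
  | nil => simp [pvLead]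
  | cons b r ih =>
    cases b with
    | false => simp [pvLead]
    | true => simp [pvLead]; omega

theorem pvLead_le_best (r : List Bool) : pvLead r ≤ pvBest r ∧ 0 ≤ pvBest r := by
  induction r with
  | nil => simp [pvLead, pvBest]
  | cons b r ih =>
    cases b <;> simp [pvLead, pvBest] <;> omega

-- A's fold over the boolean list, with seeded state
theorem pvFoldA (r : List Bool) : ∀ (s t : Int), 0 ≤ s → s ≤ t →
    (r.foldl (fun (st : Int × Int) b =>
      if b then (st.1 + 1, max st.2 (st.1 + 1)) else (0, st.2)) (s, t)).2
      = max t (max (s + pvLead r) (pvBest r)) := by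
  induction r with
  | nil => intro s t hs hst; simp [pvLead, pvBest]; omega
  | cons b r ih =>
    intro s t hs hst
    cases b with
    | false =>
      simp only [List.foldl_cons, Bool.false_eq_true, reduceIte]
      rw [ih 0 t le_rfl (le_trans hs hst)]
      have h := pvLead_le_best r
      simp [pvLead, pvBest]; omega
    | true =>
      simp only [List.foldl_cons, reduceIte]
      rw [ih (s + 1) (max t (s + 1)) (by omega) (le_max_right _ _)]
      have h := pvLead_le_best r
      have h2 := pvLead_nonneg r
      simp [pvLead, pvBest]; omega

-- shift invariance of the gap maximum
theorem pvGmax_shift (ps : List Int) : ∀ (a e : Int),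
    pvGmax a (ps.map (· + 1)) (e + 1) = pvGmax (a - 1) ps e := by
  induction ps with
  | nil => intro a e; simp [pvGmax]; ring
  | cons p ps ih =>
    intro a e
    simp only [List.map_cons, pvGmax, ih]
    have : p + 1 - 1 = p := by ring
    rw [this]
    congr 1; ring

-- core fact: the max gap between fall positions is the longest true run
theorem pvCore (r : List Bool) : ∀ (s : Int), 0 ≤ s →
    pvGmax (-s - 1) (pvFP r) (r.length : Int) = max (s + pvLead r) (pvBest r) := by
  induction r with
  | nil => intro s hs; simp [pvFP, pvGmax, pvLead, pvBest]; omega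
  | cons b r ih =>
    intro s hs
    have h := pvLead_le_best r
    cases b with
    | false =>
      simp only [pvFP, Bool.false_eq_true, reduceIte, pvGmax, List.length_cons]
      have hc : ((r.length : Int) + 1) = (r.length : Int) + 1 := rfl
      rw [show ((r.length + 1 : Nat) : Int) = (r.length : Int) + 1 by push_cast; ring]
      rw [pvGmax_shift, show (0 : Int) - 1 = -(0:Int) - 1 by ring, ih 0 le_rfl]
      simp [pvLead, pvBest]; omega
    | true =>
      simp only [pvFP, reduceIte, List.length_cons]
      rw [show ((r.length + 1 : Nat) : Int) = (r.length : Int) + 1 by push_cast; ring]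
      rw [pvGmax_shift, show -s - 1 - 1 = -(s + 1) - 1 by ring, ih (s + 1) (by omega)]
      simp [pvLead, pvBest]; omega

-- the zip/map pipeline over (a :: ps ++ [e]) is the gaps list
theorem pvZipGaps (ps : List Int) : ∀ (a e : Int),
    (((a :: (ps ++ [e])).zip (ps ++ [e])).map (fun p => p.2 - p.1 - 1))
      = pvGapsList a ps e := by
  induction ps with
  | nil => intro a e; simp [pvGapsList]
  | cons p ps ih => intro a e; simp only [List.cons_append, List.zip_cons_cons, List.map_cons, pvGapsList, ih]

theorem pvGapsFold (ps : List Int) : ∀ (a e x : Int),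
    (pvGapsList a ps e).foldl max x = max x (pvGmax a ps e) := by
  induction ps with
  | nil => intro a e x; simp [pvGapsList, pvGmax]
  | cons p ps ih =>
    intro a e x
    simp only [pvGapsList, List.foldl_cons, ih, pvGmax]
    omega

-- B's value (nonempty price) as pvGmax
theorem pvMaxGaps (a e : Int) (ps : List Int) :
    (PySem.List.max? (((a :: (ps ++ [e])).zip (ps ++ [e])).map (fun p => p.2 - p.1 - 1))
      (fun y => y)).getD 0 = pvGmax a ps e := by
  rw [pvZipGaps]
  cases ps with
  | nil => simp [pvGapsList, PySem.List.max?_id_cons, pvGmax]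
  | cons p ps =>
    simp only [pvGapsList, PySem.List.max?_id_cons, pvGapsFold, Option.getD_some, pvGmax]

-- A-side bridge: the index range mapped to adjacent pairs is the zip
theorem pvPairs (price : List Int) :
    (PySem.List.pyRange 1 (price.length : Int) 1).map
      (fun i => (PySem.List.pyGetD price (i - 1) 0, PySem.List.pyGetD price i 0))
      = price.zip price.tail := by
  apply List.ext_getElem
  · simp [PySem.List.length_pyRange_one, List.length_zip, List.length_tail]
  · intro k h1 h2
    have hk : k < price.length - 1 := by
      simpa [PySem.List.length_pyRange_one] using h1
    simp only [List.getElem_map, PySem.List.getElem_pyRange_one, List.getElem_zip,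
      List.getElem_tail]
    have e1 : (1 : Int) + (k : Int) - 1 = ((k : Nat) : Int) := by ring
    have e2 : (1 : Int) + (k : Int) = (((k + 1) : Nat) : Int) := by push_cast; ring
    rw [e1, e2, PySem.List.pyGetD_natCast, PySem.List.pyGetD_natCast]
    rw [List.getD_eq_getElem _ _ (by omega), List.getD_eq_getElem _ _ (by omega)]

-- A equals the fold over pvRises
theorem pvA_eq (price : List Int) :
    streak_RisingDays price
      = ((pvRises price).foldl (fun (st : Int × Int) b =>
          if b then (st.1 + 1, max st.2 (st.1 + 1)) else (0, st.2)) (0, 0)).2 := by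
  unfold streak_RisingDays pvRises
  rw [← pvPairs price, List.foldl_map, List.foldl_map]
  simp

-- B-side bridge: the filtered range is the false positions of pvRises
theorem pvFP_nat (r : List Bool) :
    ((List.range r.length).filter (fun k => !(r.getD k true))).map (fun (k : Nat) => (k : Int))
      = pvFP r := by
  induction r with
  | nil => simp [pvFP]
  | cons b r ih =>
    rw [List.length_cons, List.range_succ_eq_map, List.filter_cons]
    have hm : (List.map Nat.succ (List.range r.length)).filter
        (fun k => !((b :: r).getD k true))
        = ((List.range r.length).filter (fun k => !(r.getD k true))).map Nat.succ := by
      rw [List.filter_map]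
      rfl
    have hmap : ∀ (l : List Nat),
        (l.map Nat.succ).map (fun (k : Nat) => (k : Int)) = (l.map (fun (k : Nat) => (k : Int))).map (· + 1) := by
      intro l
      rw [List.map_map, List.map_map]
      apply List.map_congr_left
      intro x _
      simp [Nat.succ_eq_add_one]
    cases b with
    | false =>
      simp only [List.getD_cons_zero, Bool.not_false, reduceIte, hm, List.map_cons, hmap, ih, pvFP]
      simp
    | true =>
      simp only [List.getD_cons_zero, Bool.not_true, Bool.false_eq_true, reduceIte, hm, hmap, ih, pvFP]

theorem pvRises_getElem (price : List Int) (k : Nat) (hk : k < (pvRises price).length) :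
    (pvRises price)[k] = decide (price[k]'(by
        unfold pvRises at hk; simp [List.length_zip, List.length_tail] at hk; omega)
      < price[k + 1]'(by
        unfold pvRises at hk; simp [List.length_zip, List.length_tail] at hk; omega)) := by
  unfold pvRises
  simp [List.getElem_map, List.getElem_zip, List.getElem_tail]

theorem pvFilter (price : List Int) (h : price ≠ []) :
    (PySem.List.pyRange 0 ((price.length : Int) - 1) 1).filter
      (fun i => PySem.List.pyGetD price (i + 1) 0 ≤ PySem.List.pyGetD price i 0)
      = pvFP (pvRises price) := by
  have hlen : 1 ≤ price.length := by
    cases price with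
    | nil => exact absurd rfl h
    | cons a l => simp
  have hr : (pvRises price).length = price.length - 1 := by
    unfold pvRises; simp [List.length_zip, List.length_tail]
  have hn : ((price.length : Int) - 1) = ((pvRises price).length : Int) := by
    rw [hr]; omega
  rw [hn]
  have hcongr : (PySem.List.pyRange 0 ((pvRises price).length : Int) 1).filter
      (fun i => PySem.List.pyGetD price (i + 1) 0 ≤ PySem.List.pyGetD price i 0)
      = (PySem.List.pyRange 0 ((pvRises price).length : Int) 1).filter
      (fun i => !((pvRises price).getD i.toNat true)) := by
    apply List.filter_congr
    intro i hi
    have hib : 0 ≤ i ∧ i < ((pvRises price).length : Int) := by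
      simpa using (PySem.List.mem_pyRange_one).1 hi
    obtain ⟨k, rfl⟩ : ∃ k : Nat, i = (k : Int) := ⟨i.toNat, by omega⟩
    have hik : k < (pvRises price).length := by
      have := hib.2
      exact_mod_cast this
    have hik1 : k < price.length := by omega
    have hik2 : k + 1 < price.length := by omega
    simp only [Int.toNat_natCast]
    rw [List.getD_eq_getElem _ _ hik, pvRises_getElem price k hik]
    rw [show (k : Int) + 1 = ((k + 1 : Nat) : Int) by push_cast; ring]
    rw [PySem.List.pyGetD_natCast, PySem.List.pyGetD_natCast]
    rw [List.getD_eq_getElem _ _ hik2, List.getD_eq_getElem _ _ hik1]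
    rw [← decide_not]
    simp [not_lt]
  rw [hcongr, PySem.List.pyRange_zero_nat, List.filter_map]
  have : ((fun i => !((pvRises price).getD i.toNat true)) ∘ (fun k : Nat => (k : Int)))
      = (fun k => !((pvRises price).getD k true)) := by
    funext k; simp
  rw [this, pvFP_nat]

-- ===== VERDICT (by name: the statement is the Claim_ definition above) =====
theorem streak_RisingDays_spec : Claim_equal_streak_RisingDays := by
  intro price _
  unfold Spec_streak_RisingDays
  by_cases hp : price = []
  · subst hp; decide
  · have hlen : 1 ≤ price.length := by
      cases price with
      | nil => exact absurd rfl hp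
      | cons a l => simp
    have hr : ((pvRises price).length : Int) = (price.length : Int) - 1 := by
      unfold pvRises
      simp [List.length_zip, List.length_tail]
      omega
    rw [pvA_eq, pvFoldA _ 0 0 le_rfl le_rfl]
    unfold streak_RisingDays_alt
    rw [if_neg hp]
    simp only
    rw [pvFilter price hp]
    have : ([(-1 : Int)] ++ pvFP (pvRises price) ++ [(price.length : Int) - 1])
        = (-1 : Int) :: (pvFP (pvRises price) ++ [(price.length : Int) - 1]) := by simp
    rw [this]
    have htail : ((-1 : Int) :: (pvFP (pvRises price) ++ [(price.length : Int) - 1])).tail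
        = pvFP (pvRises price) ++ [(price.length : Int) - 1] := rfl
    rw [htail, pvMaxGaps, ← hr, show (-1 : Int) = -(0:Int) - 1 by ring,
      pvCore (pvRises price) 0 le_rfl]
    have h := pvLead_le_best (pvRises price)
    omega
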